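-- pv_equiv track=rewrite | github.com/sciapp/sampledb | sampledb/logic/node.py | search_operator
-- ===== SOURCE A (Python) =====
-- from typing import List, Tuple, Optional
--
-- OPERATORLIST = {"<": 2, "<=": 2, ">": 2, ">=": 2, "==": 2, "&&": 1,
--                 "||": 0}
--
-- def search_for_wrong_brackets(input: str) -> bool:
--     """returns Ture if Expressions parentheses is correct"""
--     if input == "":
--         return False
--     counter = 0
--     for i in range(len(input)):
--         if input[i] == "(":
--             counter += 1
--         if input[i] == ")":
--             counter -= 1
--             if counter < 0:
--                 return False
--     if counter != 0:
--         return False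
--     return True
--
-- def remove_unnecessary_brackets(string: str) -> str:
--     """removes Outer brackets recursively"""
--     while ("(" in string and
--            search_for_wrong_brackets(string[1:len(string)-1]) is True):
--         string = string[1:len(string)-1]
--     return string
--
-- def search_operator(string: str) -> Optional[Tuple[str, int]]:
--     """returns tuple with:
--     ("Operator with lowest priority as String","his position")"""
--     lomgest_operator = 2  # length of the longest operator
--     string = remove_unnecessary_brackets(string)
--     found_operators = []  # List ("operator as String","position")
--     bracketcounter = 0
--     for i in range(0, len(string)):
--         if string[i] == "(":
--             bracketcounter += 1
--         if string[i] == ")":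
--             bracketcounter -= 1
--         if bracketcounter == 0:
--             for j in range(0, lomgest_operator):
--                 if (string[i:i+1+j] in OPERATORLIST and
--                         (string[i:i+2+j] not in OPERATORLIST)):
--                     found_operators.append((string[i:i+1+j], i))
--                     i += j+1  # dont find < when operator is <=
--     found_operators = sorting_list_by_priority(found_operators)
--     if len(found_operators) is not 0:
--         return found_operators[0]
--     else:
--         return None
--
-- def sorting_list_by_priority(found_operators: List) -> List:
--     """search operator in string with lowest priority,
--     which is furthest forward"""
--     found_operators.sort(key=lambda operator: OPERATORLIST[operator[0]],
--                          reverse=False)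
--     return found_operators
-- ===== SOURCE B (Python) =====
-- from typing import Optional, Tuple
--
-- OPERATORLIST = {"<": 2, "<=": 2, ">": 2, ">=": 2, "==": 2, "&&": 1,
--                 "||": 0}
--
--
-- def _balanced(s: str) -> bool:
--     """nonempty, parentheses balanced and never dipping below zero,
--     computed with a running depth and its running minimum"""
--     if not s:
--         return False
--     depth = 0
--     low = 0
--     for ch in s:
--         if ch == "(":
--             depth += 1
--         elif ch == ")":
--             depth -= 1
--         if depth < low:
--             low = depth
--     return depth == 0 and low >= 0
--
--
-- def _strip(s: str) -> str:
--     while "(" in s and _balanced(s[1:-1]):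
--         s = s[1:-1]
--     return s
--
--
-- def search_operator(string: str) -> Optional[Tuple[str, int]]:
--     s = _strip(string)
--     n = len(s)
--     best = None  # (priority, operator, position)
--     depth = 0
--     for i, ch in enumerate(s):
--         if ch == "(":
--             depth += 1
--         elif ch == ")":
--             depth -= 1
--         if depth != 0:
--             continue
--         op = None
--         two = s[i:i + 2]
--         if two in OPERATORLIST and i + 2 < n:
--             op = two  # two-char operator with a right operand after it
--         elif ch in "<>" and i + 1 < n and s[i + 1] != "=":
--             op = ch   # one-char operator with a right operand after it
--         if op is not None and (best is None or OPERATORLIST[op] < best[0]):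
--             best = (OPERATORLIST[op], op, i)
--     return (best[1], best[2]) if best else None
-- ===== Notes on version B (the rewrite author's own statement) =====
-- stated objective: faster
-- what changed: B selects the lowest-priority top-level operator in a single pass with a running minimum (no intermediate list, no stable sort, one slice per index instead of four) and checks bracket balance with a running depth/minimum instead of A's early-exit counter loop.
import Mathlib
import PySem

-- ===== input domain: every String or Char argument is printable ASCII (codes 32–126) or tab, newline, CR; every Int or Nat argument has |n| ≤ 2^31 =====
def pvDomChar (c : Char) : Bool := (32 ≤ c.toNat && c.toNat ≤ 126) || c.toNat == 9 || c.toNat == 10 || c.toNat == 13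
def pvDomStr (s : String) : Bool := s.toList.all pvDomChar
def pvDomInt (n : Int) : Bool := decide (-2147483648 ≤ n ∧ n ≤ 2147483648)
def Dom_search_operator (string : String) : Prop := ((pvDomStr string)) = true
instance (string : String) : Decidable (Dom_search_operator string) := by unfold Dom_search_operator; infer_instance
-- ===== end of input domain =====

-- B replaces A's collect-all/stable-sort/take-first selection by a single-pass running minimum (and A's
-- early-exit bracket counter by a running depth-and-minimum balance check); measured constant-factor speed-up.

-- ===== PORT A =====
-- OPERATORLIST; keys modelled as List Char (the ports work on the character list; exact for these ASCII keys)
def OPL : PySem.Dict (List Char) Int :=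
  PySem.Dict.ofList [(['<'], 2), (['<', '='], 2), (['>'], 2), (['>', '='], 2),
                     (['=', '='], 2), (['&', '&'], 1), (['|', '|'], 0)]

-- search_for_wrong_brackets: the indexed for-loop with its early return, as recursion over the characters
def sfwbGo : List Char → Int → Bool
  | [], counter => !(counter != 0)
  | ch :: rest, counter =>
    let counter := if ch = '(' then counter + 1 else counter
    if ch = ')' then
      let counter := counter - 1
      if counter < 0 then false else sfwbGo rest counter
    else sfwbGo rest counter

def search_for_wrong_brackets (input : List Char) : Bool :=
  if input = [] then false else sfwbGo input 0

theorem slice_mid_len_lt (s : List Char) (h : s ≠ []) :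
    (PySem.List.slice s (some 1) (some ((s.length : Int) - 1))).length < s.length := by
  have h1 : 1 ≤ s.length := List.length_pos_of_ne_nil h
  have e : ((s.length : Int) - 1) = ((s.length - 1 : Nat) : Int) := by omega
  have e1 : (1 : Int) = ((1 : Nat) : Int) := rfl
  rw [e, e1, PySem.List.slice_natCast]
  simp
  omega

-- remove_unnecessary_brackets: the while loop as recursion; '"(" in string' is exact as contains for a 1-char needle
def remove_unnecessary_brackets (s : List Char) : List Char :=
  if s.contains '(' ∧
      search_for_wrong_brackets (PySem.List.slice s (some 1) (some ((s.length : Int) - 1))) = true then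
    remove_unnecessary_brackets (PySem.List.slice s (some 1) (some ((s.length : Int) - 1)))
  else s
termination_by s.length
decreasing_by
  exact slice_mid_len_lt s (by rename_i h; exact fun hnil => by simp [hnil] at h)

-- sort key: OPERATORLIST[operator[0]]; the key is always present for appended operators, getD is exact there
def sort_key (p : List Char × Int) : Int := PySem.Dict.getD OPL p.1 0

def sorting_list_by_priority (found : List (List Char × Int)) : List (List Char × Int) :=
  PySem.List.sorted found sort_key false

-- the j-loop 'for j in range(0, lomgest_operator)' (lomgest_operator = 2)
def aInner (s : List Char) (i : Int) (found0 : List (List Char × Int)) : List (List Char × Int) :=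
  (PySem.List.pyRange 0 2 1).foldl
    (fun found j =>
      if OPL.contains (PySem.List.slice s (some i) (some (i + 1 + j))) &&
          !(OPL.contains (PySem.List.slice s (some i) (some (i + 2 + j)))) then
        found ++ [(PySem.List.slice s (some i) (some (i + 1 + j)), i)]
      else found) found0

-- the body of 'for i in range(0, len(string))'; state = (found_operators, bracketcounter)
def aStep (s : List Char) (st : List (List Char × Int) × Int) (i : Int) :
    List (List Char × Int) × Int :=
  let ch := PySem.List.pyGetD s i ' '   -- string[i], i from range(len(string))
  let bc := if ch = '(' then st.2 + 1 else st.2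
  let bc := if ch = ')' then bc - 1 else bc
  let found := if bc == 0 then aInner s i st.1 else st.1
  (found, bc)

def search_operator (string : String) : Option (String × Int) :=
  let s := remove_unnecessary_brackets string.toList
  let st := (PySem.List.pyRange 0 (s.length : Int) 1).foldl (aStep s) ([], 0)
  let fo := sorting_list_by_priority st.1
  if fo.length ≠ 0 then (PySem.List.pyGet? fo 0).map (fun p => (String.ofList p.1, p.2)) else none

-- ===== PORT B =====
def balStep (p : Int × Int) (ch : Char) : Int × Int :=
  let depth := if ch = '(' then p.1 + 1 else if ch = ')' then p.1 - 1 else p.1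
  (depth, if depth < p.2 then depth else p.2)

def balancedB (s : List Char) : Bool :=
  if s = [] then false
  else
    let p := s.foldl balStep (0, 0)
    p.1 == 0 && decide (0 ≤ p.2)

theorem slice_neg_one_len_lt (s : List Char) (h : s ≠ []) :
    (PySem.List.slice s (some 1) (some (-1))).length < s.length := by
  have h1 : 1 ≤ s.length := List.length_pos_of_ne_nil h
  simp [PySem.List.length_slice]
  omega

def stripB (s : List Char) : List Char :=
  if s.contains '(' ∧ balancedB (PySem.List.slice s (some 1) (some (-1))) = true then
    stripB (PySem.List.slice s (some 1) (some (-1)))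
  else s
termination_by s.length
decreasing_by
  exact slice_neg_one_len_lt s (by rename_i h; exact fun hnil => by simp [hnil] at h)

-- loop body of B: state = (depth, best); best = (priority, operator, position)
def bStep (s : List Char) (n : Int) (st : Int × Option (Int × List Char × Int))
    (p : Int × Char) : Int × Option (Int × List Char × Int) :=
  let i := p.1
  let ch := p.2
  let depth := if ch = '(' then st.1 + 1 else if ch = ')' then st.1 - 1 else st.1
  if depth != 0 then (depth, st.2)
  else
    let two := PySem.List.slice s (some i) (some (i + 2))
    let op? : Option (List Char) :=
      if OPL.contains two ∧ i + 2 < n then some two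
      else if (ch = '<' ∨ ch = '>') ∧ i + 1 < n ∧ PySem.List.pyGetD s (i + 1) ' ' ≠ '=' then
        some [ch]
      else none
    match op? with
    | none => (depth, st.2)
    | some op =>
      let pr := PySem.Dict.getD OPL op 0
      match st.2 with
      | none => (depth, some (pr, op, i))
      | some b => if pr < b.1 then (depth, some (pr, op, i)) else (depth, st.2)

def search_operator_alt (string : String) : Option (String × Int) :=
  let s := stripB string.toList
  let st := (PySem.List.enumerate s).foldl (bStep s (s.length : Int)) (0, none)
  st.2.map (fun b => (String.ofList b.2.1, b.2.2))

-- ===== PRECONDITION & SPEC =====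
def Spec_search_operator (string : String) (out : Option (String × Int)) : Prop := out = search_operator_alt string
instance (string : String) (out : Option (String × Int)) : Decidable (Spec_search_operator string out) := by unfold Spec_search_operator; infer_instance

-- ===== CLAIM (what is proved, stated in full; the proofs are below) =====
def Claim_equal_search_operator : Prop := ∀ (string : String), Dom_search_operator string → Spec_search_operator string (search_operator string)

-- ===== LEMMAS AND PROOFS =====

theorem opl_mk : OPL = PySem.Dict.mk [(['<'], 2), (['<', '='], 2), (['>'], 2), (['>', '='], 2),
    (['=', '='], 2), (['&', '&'], 1), (['|', '|'], 0)] := by decide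

theorem beq_swap (x y : Char) : (x == y) = decide (y = x) := by
  by_cases h : y = x <;> simp [h]; exact fun hc => h hc.symm

theorem opl_mem1 (a : Char) : OPL.contains [a] = (decide (a = '<') || decide (a = '>')) := by
  rw [opl_mk]; simp [PySem.Dict.contains_mk]; simp only [beq_swap]

theorem opl_mem2 (a b : Char) : OPL.contains [a, b] =
    (decide (a = '<') && decide (b = '=') || decide (a = '>') && decide (b = '=') ||
     decide (a = '=') && decide (b = '=') ||
     decide (a = '&') && decide (b = '&') || decide (a = '|') && decide (b = '|')) := by
  rw [opl_mk]; simp [PySem.Dict.contains_mk]; simp only [beq_swap]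
  ac_rfl

theorem opl_mem3 (a b c : Char) : OPL.contains [a, b, c] = false := by
  rw [opl_mk]; simp [PySem.Dict.contains_mk]

-- ---- balance check equivalence ----
theorem balStep_paren (c m : Int) (h : m ≤ c) : balStep (c, m) '(' = (c + 1, m) := by
  dsimp only [balStep]
  rw [if_pos rfl, if_neg (by omega)]
theorem balStep_close (c m : Int) :
    balStep (c, m) ')' = (c - 1, if c - 1 < m then c - 1 else m) := by
  dsimp only [balStep]
  rw [if_neg (by decide), if_pos rfl]
theorem balStep_other (c m : Int) (ch : Char) (h : m ≤ c) (hp : ch ≠ '(') (hq : ch ≠ ')') :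
    balStep (c, m) ch = (c, m) := by
  dsimp only [balStep]
  rw [if_neg hp, if_neg hq, if_neg (by omega)]
theorem balStep_min_le : ∀ (u : List Char) (c m : Int), (u.foldl balStep (c, m)).2 ≤ m := by
  intro u
  induction u with
  | nil => intro c m; simp
  | cons ch rest ih =>
    intro c m
    simp only [List.foldl_cons]
    refine le_trans (ih _ _) ?_
    dsimp only [balStep]
    split <;> omega
theorem sfwbGo_eq_fold : ∀ (u : List Char) (c m : Int), 0 ≤ m → m ≤ c →
    sfwbGo u c = ((u.foldl balStep (c, m)).1 == 0 && decide (0 ≤ (u.foldl balStep (c, m)).2)) := by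
  intro u
  induction u with
  | nil =>
    intro c m h0 h1
    simp [sfwbGo, h0]
    rfl
  | cons ch rest ih =>
    intro c m h0 h1
    by_cases hp : ch = '('
    · subst hp
      rw [show sfwbGo ('(' :: rest) c = sfwbGo rest (c + 1) by simp [sfwbGo]]
      simp only [List.foldl_cons, balStep_paren c m h1]
      exact ih (c + 1) m h0 (by omega)
    · by_cases hq : ch = ')'
      · subst hq
        rw [show sfwbGo (')' :: rest) c
            = (if c - 1 < 0 then false else sfwbGo rest (c - 1)) by simp [sfwbGo]]
        simp only [List.foldl_cons, balStep_close c m]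
        by_cases hneg : c - 1 < 0
        · rw [if_pos hneg, show (if c - 1 < m then c - 1 else m) = c - 1 by split <;> omega]
          have hle := balStep_min_le rest (c - 1) (c - 1)
          have hlt : (rest.foldl balStep (c - 1, c - 1)).2 < 0 := by omega
          have hd : decide (0 ≤ (rest.foldl balStep (c - 1, c - 1)).2) = false := by
            simp; omega
          simp [hd]
        · rw [if_neg hneg]
          exact ih (c - 1) (if c - 1 < m then c - 1 else m) (by split <;> omega) (by split <;> omega)
      · rw [show sfwbGo (ch :: rest) c = sfwbGo rest c by simp [sfwbGo, hp, hq]]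
        simp only [List.foldl_cons, balStep_other c m ch h1 hp hq]
        exact ih c m h0 h1

theorem balanced_eq (u : List Char) : search_for_wrong_brackets u = balancedB u := by
  unfold search_for_wrong_brackets balancedB
  by_cases h : u = []
  · simp [h]
  · simp only [if_neg h]
    exact sfwbGo_eq_fold u 0 0 le_rfl le_rfl

-- ---- stripping equivalence ----
theorem slice_end_eq (s : List Char) :
    PySem.List.slice s (some 1) (some ((s.length : Int) - 1))
      = PySem.List.slice s (some 1) (some (-1)) := by
  have h : PySem.List.clampIdx s.length ((s.length : Int) - 1)
      = PySem.List.clampIdx s.length (-1) := by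
    rcases Nat.eq_zero_or_pos s.length with h | h
    · rw [h]; norm_num
    · have e : ((s.length : Int) - 1) = ((s.length - 1 : Nat) : Int) := by omega
      rw [e, PySem.List.clampIdx_natCast, PySem.List.clampIdx_neg_one]; omega
  unfold PySem.List.slice
  simp [h]

theorem strip_eq (s : List Char) : remove_unnecessary_brackets s = stripB s := by
  rw [remove_unnecessary_brackets, stripB, slice_end_eq, balanced_eq]
  split
  · exact strip_eq _
  · rfl
termination_by s.length
decreasing_by
  rename_i h
  exact slice_neg_one_len_lt s (fun hnil => by simp [hnil] at h)

-- ---- selection equivalence ----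
-- first-minimum fold on elements
def updE (h : Option (List Char × Int)) (x : List Char × Int) : Option (List Char × Int) :=
  match h with
  | none => some x
  | some y => some (if sort_key x < sort_key y then x else y)

-- first-minimum fold on B's (priority, operator, position) triples
def updB (h : Option (Int × List Char × Int)) (x : List Char × Int) :
    Option (Int × List Char × Int) :=
  match h with
  | none => some (sort_key x, x.1, x.2)
  | some t => if sort_key x < t.1 then some (sort_key x, x.1, x.2) else some t

def lift (x : List Char × Int) : Int × List Char × Int := (sort_key x, x.1, x.2)

theorem insertBy_head (lt : (List Char × Int) → (List Char × Int) → Bool) (x : List Char × Int) :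
    ∀ (acc : List (List Char × Int)),
      (PySem.List.insertBy lt x acc).head?
        = some (match acc with | [] => x | y :: _ => if lt x y then x else y) := by
  intro acc
  cases acc with
  | nil => simp [PySem.List.insertBy]
  | cons y ys => simp [PySem.List.insertBy]; split <;> simp

theorem head_foldl_insertBy (lt : (List Char × Int) → (List Char × Int) → Bool) :
    ∀ (l acc : List (List Char × Int)),
      (l.foldl (fun acc x => PySem.List.insertBy lt x acc) acc).head?
        = l.foldl (fun h x => match h with
            | none => some x
            | some y => some (if lt x y then x else y)) acc.head? := by
  intro l
  induction l with
  | nil => intro acc; rfl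
  | cons x xs ih =>
    intro acc
    simp only [List.foldl_cons]
    rw [ih]
    congr 1
    rw [insertBy_head]
    cases acc <;> simp

theorem sorted_head (l : List (List Char × Int)) :
    (PySem.List.sorted l sort_key false).head? = l.foldl updE none := by
  rw [PySem.List.sorted_eq_foldl_insertBy, head_foldl_insertBy]
  simp only [List.head?_nil]
  apply PySem.List.foldl_congr_mem
  intro h x _
  cases h <;> simp [updE]

theorem foldl_updB_lift (l : List (List Char × Int)) :
    ∀ (h : Option (List Char × Int)),
      l.foldl updB (h.map lift) = (l.foldl updE h).map lift := by
  induction l with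
  | nil => intro h; rfl
  | cons x xs ih =>
    intro h
    simp only [List.foldl_cons]
    rw [show updB (h.map lift) x = (updE h x).map lift by
      cases h with
      | none => rfl
      | some y =>
        by_cases hc : sort_key x < sort_key y <;> simp [updB, updE, lift, hc]]
    exact ih _

-- ---- the per-index operator rule ----
-- which operator A's j-loop finds at index k (proof-only description)
def opSel (s : List Char) (k : Nat) : Option (List Char) :=
  if h2 : k + 2 < s.length then
    (if OPL.contains [s[k], s[k + 1]] then some [s[k], s[k + 1]]
     else if (s[k] = '<' ∨ s[k] = '>') ∧ s[k + 1] ≠ '=' then some [s[k]] else none)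
  else if h1 : k + 1 < s.length then
    (if (s[k] = '<' ∨ s[k] = '>') ∧ s[k + 1] ≠ '=' then some [s[k]] else none)
  else none

theorem slice_take (s : List Char) (k m : Nat) :
    PySem.List.slice s (some (k : Int)) (some ((k : Int) + (m : Int)))
      = (s.drop k).take m := by
  rw [PySem.List.slice_toNat (ha := by positivity) (hb := by positivity)]
  simp only [← Nat.cast_add, Int.toNat_natCast, Nat.add_sub_cancel_left]

theorem pyRange_two : PySem.List.pyRange 0 2 1 = [0, 1] := by decide

theorem getD_at (s : List Char) (k : Nat) (hk : k < s.length) :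
    PySem.List.pyGetD s (k : Int) ' ' = s[k] := by
  rw [PySem.List.pyGetD_natCast]
  exact List.getD_eq_getElem s ' ' hk

theorem aInner_eq (s : List Char) (k : Nat) (hk : k < s.length)
    (found : List (List Char × Int)) :
    aInner s (k : Int) found
      = found ++ ((opSel s k).elim [] (fun op => [(op, (k : Int))])) := by
  unfold aInner
  rw [pyRange_two]
  have e1 : ((k : Int) + 1 + 0) = (k : Int) + ((1 : Nat) : Int) := by omega
  have e2 : ((k : Int) + 2 + 0) = (k : Int) + ((2 : Nat) : Int) := by omega
  have e2' : ((k : Int) + 1 + 1) = (k : Int) + ((2 : Nat) : Int) := by omega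
  have e3 : ((k : Int) + 2 + 1) = (k : Int) + ((3 : Nat) : Int) := by omega
  simp only [List.foldl_cons, List.foldl_nil, e1, e2, e2', e3, slice_take]
  rw [← List.getElem_cons_drop hk]
  by_cases h1 : k + 1 < s.length
  · rw [← List.getElem_cons_drop h1]
    by_cases h2 : k + 2 < s.length
    · rw [← List.getElem_cons_drop h2]
      simp only [List.take_succ_cons, List.take_zero, opl_mem3,
        Bool.not_false, Bool.and_true, opSel, dif_pos h2]
      by_cases hm2 : OPL.contains [s[k], s[k + 1]]
      · simp only [hm2, Bool.not_true, Bool.and_false, if_false, if_pos rfl]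
        simp
      · simp only [hm2, Bool.not_false, Bool.and_true, if_neg (by simp [hm2] : ¬(OPL.contains [s[k], s[k+1]] = true))]
        rw [opl_mem1] at *
        rw [opl_mem2] at hm2
        by_cases ha1 : s[k] = '<' <;> by_cases ha2 : s[k] = '>' <;>
          by_cases hb : s[k + 1] = '=' <;> simp_all
    · have hd : s.drop (k + 2) = [] := List.drop_eq_nil_of_le (by omega)
      rw [hd]
      simp only [List.take_succ_cons, List.take_zero, List.take_nil,
        Bool.and_not_self, if_false, opSel, dif_neg h2, dif_pos h1]
      rw [opl_mem1, opl_mem2]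
      by_cases ha1 : s[k] = '<' <;> by_cases ha2 : s[k] = '>' <;>
        by_cases hb : s[k + 1] = '=' <;> simp_all
  · have hd : s.drop (k + 1) = [] := List.drop_eq_nil_of_le (by omega)
    rw [hd]
    simp only [List.take_succ_cons, List.take_zero, List.take_nil,
      Bool.and_not_self, if_false, opSel, dif_neg (by omega : ¬ k + 2 < s.length), dif_neg h1]
    simp

theorem bOp_eq (s : List Char) (k : Nat) (hk : k < s.length) :
    (if OPL.contains (PySem.List.slice s (some (k : Int)) (some ((k : Int) + 2)))
          ∧ (k : Int) + 2 < (s.length : Int) then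
        some (PySem.List.slice s (some (k : Int)) (some ((k : Int) + 2)))
      else if (s[k] = '<' ∨ s[k] = '>') ∧ (k : Int) + 1 < (s.length : Int)
          ∧ PySem.List.pyGetD s ((k : Int) + 1) ' ' ≠ '=' then some [s[k]]
      else none)
      = opSel s k := by
  have hsl : PySem.List.slice s (some (k : Int)) (some ((k : Int) + 2)) = (s.drop k).take 2 := by
    rw [show ((k : Int) + 2) = (k : Int) + ((2 : Nat) : Int) by omega, slice_take]
  have hi2 : (((k : Int) + 2 < (s.length : Int)) : Prop) ↔ k + 2 < s.length := by omega
  have hi1 : (((k : Int) + 1 < (s.length : Int)) : Prop) ↔ k + 1 < s.length := by omega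
  rw [hsl, ← List.getElem_cons_drop hk]
  by_cases h1 : k + 1 < s.length
  · have eg : PySem.List.pyGetD s ((k : Int) + 1) ' ' = s[k + 1] := by
      rw [show ((k : Int) + 1) = ((k + 1 : Nat) : Int) by omega]
      exact getD_at s (k + 1) h1
    rw [← List.getElem_cons_drop h1, eg]
    by_cases h2 : k + 2 < s.length
    · simp only [List.take_succ_cons, List.take_zero, opSel, dif_pos h2, hi2, hi1, h2, h1]
      by_cases hm2 : OPL.contains [s[k], s[k + 1]] = true
      · simp [hm2]
      · simp [hm2]
    · simp only [List.take_succ_cons, List.take_zero, opSel, dif_neg h2, dif_pos h1,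
        hi2, hi1, h2, h1]
      simp
  · have hd : s.drop (k + 1) = [] := List.drop_eq_nil_of_le (by omega)
    rw [hd]
    simp only [List.take_succ_cons, List.take_nil, opSel,
      dif_neg (by omega : ¬ k + 2 < s.length), dif_neg h1, hi2, hi1, h1,
      (by omega : ¬ k + 2 < s.length)]
    simp
    exact fun _ => by omega

theorem step_rel (s : List Char) (i : Int) (h0 : 0 ≤ i) (h1 : i < (s.length : Int))
    (found : List (List Char × Int)) (bc : Int) :
    bStep s (s.length : Int) (bc, found.foldl updB none) (i, PySem.List.pyGetD s i ' ')
      = ((aStep s (found, bc) i).2, (aStep s (found, bc) i).1.foldl updB none) := by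
  obtain ⟨k, rfl⟩ : ∃ k : Nat, i = (k : Int) := ⟨i.toNat, (Int.toNat_of_nonneg h0).symm⟩
  have hk : k < s.length := by exact_mod_cast h1
  unfold aStep bStep
  rw [getD_at s k hk]
  set ch := s[k] with hch
  have hdep : (if ch = '(' then bc + 1 else if ch = ')' then bc - 1 else bc)
      = (if ch = ')' then (if ch = '(' then bc + 1 else bc) - 1
         else (if ch = '(' then bc + 1 else bc)) := by
    by_cases hp : ch = '(' <;> by_cases hq : ch = ')' <;> simp_all
  dsimp only
  rw [← hdep]
  set d := if ch = '(' then bc + 1 else if ch = ')' then bc - 1 else bc with hd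
  by_cases hz : d = 0
  · have hA : (d == 0) = true := by simp [hz]
    have hB : ¬ ((d != 0) = true) := by simp [hz]
    rw [if_neg hB, if_pos hA]
    rw [bOp_eq s k hk, aInner_eq s k hk found]
    cases hop : opSel s k with
    | none => simp
    | some op =>
      simp only [Option.elim, List.foldl_append, List.foldl_cons, List.foldl_nil]
      cases hb : found.foldl updB none with
      | none => rfl
      | some b =>
        dsimp only [updB]
        by_cases hlt : PySem.Dict.getD OPL op 0 < b.1
        · rw [if_pos hlt, if_pos (show sort_key (op, (k : Int)) < b.1 from hlt)]
          rfl
        · rw [if_neg hlt, if_neg (show ¬ sort_key (op, (k : Int)) < b.1 from hlt)]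
  · have hA : ¬ ((d == 0) = true) := by simp [hz]
    have hB : (d != 0) = true := by simp [hz]
    rw [if_pos hB, if_neg hA]

theorem loop_rel (s : List Char) :
    ∀ (l : List Int), (∀ i ∈ l, 0 ≤ i ∧ i < (s.length : Int)) →
      ∀ (found : List (List Char × Int)) (bc : Int),
        l.foldl (fun st j => bStep s (s.length : Int) st (j, PySem.List.pyGetD s j ' '))
            (bc, found.foldl updB none)
          = ((l.foldl (aStep s) (found, bc)).2,
             (l.foldl (aStep s) (found, bc)).1.foldl updB none) := by
  intro l
  induction l with
  | nil => intro _ found bc; rfl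
  | cons x xs ih =>
    intro hmem found bc
    obtain ⟨hx, hxs⟩ : (0 ≤ x ∧ x < (s.length : Int)) ∧ ∀ i ∈ xs, 0 ≤ i ∧ i < (s.length : Int) := by
      constructor
      · exact hmem x (List.mem_cons_self)
      · exact fun i hi => hmem i (List.mem_cons_of_mem _ hi)
    simp only [List.foldl_cons]
    rw [step_rel s x hx.1 hx.2 found bc]
    exact ih hxs _ _

theorem loop_rel0 (s : List Char) :
    (PySem.List.pyRange 0 (s.length : Int) 1).foldl
        (fun st j => bStep s (s.length : Int) st (j, PySem.List.pyGetD s j ' ')) (0, none)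
      = (((PySem.List.pyRange 0 (s.length : Int) 1).foldl (aStep s) ([], 0)).2,
         ((PySem.List.pyRange 0 (s.length : Int) 1).foldl (aStep s) ([], 0)).1.foldl updB none) := by
  exact loop_rel s _ (fun i hi => by
    rw [PySem.List.mem_pyRange_one] at hi
    exact ⟨hi.1, hi.2⟩) [] 0

theorem final_eq (found : List (List Char × Int)) :
    (if (sorting_list_by_priority found).length ≠ 0 then
        (PySem.List.pyGet? (sorting_list_by_priority found) 0).map
          (fun p => (String.ofList p.1, p.2))
      else none)
      = (found.foldl updB none).map (fun b => (String.ofList b.2.1, b.2.2)) := by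
  have h1 : (sorting_list_by_priority found).head? = found.foldl updE none := sorted_head found
  have h2 : found.foldl updB none = (found.foldl updE none).map lift := by
    simpa using foldl_updB_lift found none
  rw [h2]
  cases hfo : sorting_list_by_priority found with
  | nil =>
    rw [hfo] at h1
    simp at h1
    simp [← h1]
  | cons y ys =>
    rw [hfo] at h1
    simp at h1
    rw [if_pos (by simp), PySem.List.pyGet?_zero_cons, ← h1]
    simp [lift]

-- ===== VERDICT (by name: the statement is the Claim_ definition above) =====
theorem search_operator_spec : Claim_equal_search_operator := by
  intro string _
  unfold Spec_search_operator search_operator search_operator_alt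
  simp only [strip_eq]
  rw [PySem.List.enumerate_eq_map_pyRange _ ' ', List.foldl_map]
  rw [show PySem.List.len (stripB string.toList) = ((stripB string.toList).length : Int) from rfl]
  rw [loop_rel0 (stripB string.toList), final_eq]
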